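-- pv_equiv track=rewrite | github.com/oat9002/SentimentalPrediction | to_testset.py | divided_thread_len_end
-- ===== SOURCE A (Python) =====
-- def divided_thread_len_end(size, total_thread):
--     thread_len_end = []
--     temp = 0
--     t_size = size
--     for idx in range(0, total_thread):
--         divide = int(size / total_thread)
--         if idx != total_thread - 1:
--             thread_len_end.append(divide + temp)
--             t_size -= divide
--         else:
--             thread_len_end.append(t_size + temp)
--         temp += divide
--     return thread_len_end
-- ===== SOURCE B (Python) =====
-- def divided_thread_len_end(size, total_thread):
--     if total_thread <= 0:
--         return []
--     d = int(size / total_thread)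
--     return [d * i for i in range(1, total_thread)] + [size]
-- ===== Notes on version B (the rewrite author's own statement) =====
-- stated objective: simpler
-- what changed: Replaces the accumulator-threading loop (running temp, shrinking t_size, last-index branch) by a direct closed form: guard total_thread <= 0, compute d = int(size/total_thread) once, and return [d*i for i in range(1, total_thread)] + [size]; per-iteration work drops to one multiplication.
import Mathlib
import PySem

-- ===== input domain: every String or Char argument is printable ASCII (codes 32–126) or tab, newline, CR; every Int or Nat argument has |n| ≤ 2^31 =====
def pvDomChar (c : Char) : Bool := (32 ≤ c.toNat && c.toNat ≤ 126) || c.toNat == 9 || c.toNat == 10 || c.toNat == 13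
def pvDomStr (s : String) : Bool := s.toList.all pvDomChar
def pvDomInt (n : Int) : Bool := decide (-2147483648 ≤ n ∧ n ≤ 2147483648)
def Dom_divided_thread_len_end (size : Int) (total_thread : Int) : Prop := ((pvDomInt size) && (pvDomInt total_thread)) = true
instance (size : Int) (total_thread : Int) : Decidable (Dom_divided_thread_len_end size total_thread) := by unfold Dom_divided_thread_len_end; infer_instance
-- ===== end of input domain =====

-- B replaces A's temp/t_size accumulator loop with a guarded closed-form list of multiples (objective: simpler).

-- ===== PORT A =====
-- Python's int(size / total_thread) truncates the float quotient toward zero; for |size|, |total_thread| ≤ 2^31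
-- (the stated Dom) this equals exact truncating integer division, ported as Int.tdiv.
def divided_thread_len_end (size : Int) (total_thread : Int) : List Int :=
  (((PySem.List.pyRange 0 total_thread 1).foldl
    (fun (st : List Int × Int × Int) idx =>
      let divide := Int.tdiv size total_thread
      if idx ≠ total_thread - 1 then
        (st.1 ++ [divide + st.2.1], st.2.1 + divide, st.2.2 - divide)
      else
        (st.1 ++ [st.2.2 + st.2.1], st.2.1 + divide, st.2.2))
    ([], 0, size)) : List Int × Int × Int).1

-- ===== PORT B =====
def divided_thread_len_end_alt (size : Int) (total_thread : Int) : List Int :=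
  if total_thread ≤ 0 then []
  else
    ((PySem.List.pyRange 1 total_thread 1).map (fun i => Int.tdiv size total_thread * i)) ++ [size]

-- ===== PRECONDITION & SPEC =====
def Spec_divided_thread_len_end (size : Int) (total_thread : Int) (out : List Int) : Prop := out = divided_thread_len_end_alt size total_thread
instance (size : Int) (total_thread : Int) (out : List Int) : Decidable (Spec_divided_thread_len_end size total_thread out) := by unfold Spec_divided_thread_len_end; infer_instance

-- ===== CLAIM (what is proved, stated in full; the proofs are below) =====
def Claim_equal_divided_thread_len_end : Prop := ∀ (size : Int) (total_thread : Int), Dom_divided_thread_len_end size total_thread → Spec_divided_thread_len_end size total_thread (divided_thread_len_end size total_thread)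

-- ===== LEMMAS AND PROOFS =====

-- The loop body of A's port, abbreviated for the lemmas.
def pvStepA (size total_thread : Int) (st : List Int × Int × Int) (idx : Int) : List Int × Int × Int :=
  let divide := Int.tdiv size total_thread
  if idx ≠ total_thread - 1 then
    (st.1 ++ [divide + st.2.1], st.2.1 + divide, st.2.2 - divide)
  else
    (st.1 ++ [st.2.2 + st.2.1], st.2.1 + divide, st.2.2)

-- Invariant of the loop over the first total_thread - 1 indices (none of which is the last index).
theorem pvLoopA_prefix (size total_thread : Int) (m : Nat) (hm : (m : Int) ≤ total_thread - 1) :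
    (PySem.List.pyRange 0 (m : Int) 1).foldl (pvStepA size total_thread) ([], 0, size)
      = ((List.range m).map (fun i : Nat => Int.tdiv size total_thread * ((i : Int) + 1)),
         Int.tdiv size total_thread * (m : Int),
         size - Int.tdiv size total_thread * (m : Int)) := by
  induction m with
  | zero => simp
  | succ k ih =>
    have hk : (k : Int) ≤ total_thread - 1 := by push_cast at hm ⊢; omega
    have hlt : (k : Int) ≠ total_thread - 1 := by push_cast at hm; omega
    have hsplit : PySem.List.pyRange 0 ((k : Nat) + 1 : Int) 1
        = PySem.List.pyRange 0 (k : Int) 1 ++ [(k : Int)] :=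
      PySem.List.pyRange_one_succ_right (by positivity)
    push_cast at hsplit ⊢
    rw [hsplit, List.foldl_append, ih hk]
    simp [pvStepA, hlt, List.range_succ]
    constructor
    · ring_nf
    · constructor <;> ring

theorem divided_thread_len_end_closed (size total_thread : Int) :
    divided_thread_len_end size total_thread = divided_thread_len_end_alt size total_thread := by
  by_cases h : total_thread ≤ 0
  · simp [divided_thread_len_end, divided_thread_len_end_alt, h,
      PySem.List.pyRange_one_eq_nil h]
  · have h1 : (1 : Int) ≤ total_thread := by omega
    set m : Nat := (total_thread - 1).toNat with hm
    have hmc : ((m : Int)) = total_thread - 1 := by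
      rw [hm]; exact Int.toNat_of_nonneg (by omega)
    have hsplit : PySem.List.pyRange 0 total_thread 1
        = PySem.List.pyRange 0 (total_thread - 1) 1 ++ [total_thread - 1] := by
      have := PySem.List.pyRange_one_succ_right (a := 0) (b := total_thread - 1) (by omega)
      simpa using this
    have hpre := pvLoopA_prefix size total_thread m (le_of_eq hmc)
    rw [hmc] at hpre
    have hA : divided_thread_len_end size total_thread
        = (List.range m).map (fun i : Nat => Int.tdiv size total_thread * ((i : Int) + 1)) ++ [size] := by
      unfold divided_thread_len_end
      rw [hsplit, List.foldl_append]
      have : (PySem.List.pyRange 0 (total_thread - 1) 1).foldl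
          (fun (st : List Int × Int × Int) idx =>
            let divide := Int.tdiv size total_thread
            if idx ≠ total_thread - 1 then
              (st.1 ++ [divide + st.2.1], st.2.1 + divide, st.2.2 - divide)
            else
              (st.1 ++ [st.2.2 + st.2.1], st.2.1 + divide, st.2.2)) ([], 0, size)
          = ((List.range m).map (fun i : Nat => Int.tdiv size total_thread * ((i : Int) + 1)),
             Int.tdiv size total_thread * ((m : Int)),
             size - Int.tdiv size total_thread * ((m : Int))) := by
        rw [hmc]; exact hpre
      rw [this]
      simp
    have hB : divided_thread_len_end_alt size total_thread
        = (List.range m).map (fun i : Nat => Int.tdiv size total_thread * ((i : Int) + 1)) ++ [size] := by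
      unfold divided_thread_len_end_alt
      rw [if_neg (by omega)]
      rw [PySem.List.pyRange_one (a := 1) (b := total_thread)]
      have : (total_thread - 1).toNat = m := hm.symm
      rw [this, List.map_map]
      congr 1
      apply List.map_congr_left
      intro i _
      simp only [Function.comp_apply]
      ring
    rw [hA, hB]

-- ===== VERDICT (by name: the statement is the Claim_ definition above) =====
theorem divided_thread_len_end_spec : Claim_equal_divided_thread_len_end := by
  intro size total_thread _
  unfold Spec_divided_thread_len_end
  exact divided_thread_len_end_closed size total_thread
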